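-- pv_equiv track=rewrite | github.com/jupyter/papyri | velin/examples_section_utils.py | splitblank
-- ===== SOURCE A (Python) =====
-- def splitblank(list):
--     items = []
--     current = []
--     for l in list:
--         if not l.strip():
--             if current:
--                 items.append(current)
--             current = []
--         else:
--             current.append(l)
--     if current:
--         items.append(current)
--     return items
-- ===== SOURCE B (Python) =====
-- from itertools import groupby
--
--
-- def splitblank(list):
--     return [[*g] for k, g in groupby(list, key=lambda l: not l.strip()) if not k]
-- ===== Notes on version B (the rewrite author's own statement) =====
-- stated objective: idiomatic
-- what changed: Replaces the explicit items/current accumulator state machine with itertools.groupby partitioning the input into maximal blank/non-blank runs and keeping the non-blank runs.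
import Mathlib
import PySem

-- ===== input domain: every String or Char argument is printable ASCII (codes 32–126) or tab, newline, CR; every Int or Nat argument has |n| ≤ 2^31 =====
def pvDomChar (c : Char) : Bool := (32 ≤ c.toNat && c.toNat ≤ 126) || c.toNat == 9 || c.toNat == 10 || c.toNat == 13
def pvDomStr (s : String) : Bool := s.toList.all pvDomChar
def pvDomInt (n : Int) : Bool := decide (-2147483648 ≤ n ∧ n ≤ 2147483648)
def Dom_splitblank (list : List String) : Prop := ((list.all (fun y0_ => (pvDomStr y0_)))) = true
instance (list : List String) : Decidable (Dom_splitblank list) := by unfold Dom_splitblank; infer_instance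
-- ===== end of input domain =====

-- B replaces A's items/current accumulator state machine with a groupby-style
-- run partition (maximal blank/non-blank runs) followed by filtering out blank runs.


-- ===== PORT A =====
-- truthiness of l.strip(): blank iff the stripped string is empty
def sbBlank (l : String) : Bool := PySem.Str.strip l == ""

-- the for-loop of A as a tail recursion over (items, current)
def sbLoop (items : List (List String)) (current : List String) :
    List String → List (List String)
  | [] => if current ≠ [] then items ++ [current] else items
  | l :: ls =>
    if sbBlank l then
      sbLoop (if current ≠ [] then items ++ [current] else items) [] ls
    else
      sbLoop items (current ++ [l]) ls

def splitblank (list : List String) : List (List String) := sbLoop [] [] list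

-- ===== PORT B =====
-- groupby machinery: sbSpan takes the maximal prefix whose key equals k
def sbSpan (k : Bool) : List String → List String × List String
  | [] => ([], [])
  | x :: xs =>
    if sbBlank x = k then (x :: (sbSpan k xs).1, (sbSpan k xs).2)
    else ([], x :: xs)

theorem sbSpan_len (k : Bool) (xs : List String) : (sbSpan k xs).2.length ≤ xs.length := by
  induction xs with
  | nil => simp [sbSpan]
  | cons x xs ih =>
    simp only [sbSpan]
    split
    · exact le_trans ih (Nat.le_succ _)
    · simp

-- groupby: list of (key, maximal run with that key)
def sbGroupby : List String → List (Bool × List String)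
  | [] => []
  | x :: xs =>
    (sbBlank x, x :: (sbSpan (sbBlank x) xs).1) :: sbGroupby (sbSpan (sbBlank x) xs).2
termination_by ls => ls.length
decreasing_by simpa using Nat.lt_succ_of_le (sbSpan_len _ _)

def splitblank_alt (list : List String) : List (List String) :=
  ((sbGroupby list).filter (fun p => !p.1)).map Prod.snd

-- ===== PRECONDITION & SPEC =====
def Spec_splitblank (list : List String) (out : List (List String)) : Prop := out = splitblank_alt list
instance (list : List String) (out : List (List String)) : Decidable (Spec_splitblank list out) := by unfold Spec_splitblank; infer_instance

-- ===== CLAIM (what is proved, stated in full; the proofs are below) =====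
def Claim_equal_splitblank : Prop := ∀ (list : List String), Dom_splitblank list → Spec_splitblank list (splitblank list)

-- ===== LEMMAS AND PROOFS =====

-- A's loop with zero accumulated items, as a plain recursion
def sbAltCur (cur : List String) : List String → List (List String)
  | [] => if cur ≠ [] then [cur] else []
  | l :: ls =>
    if sbBlank l then (if cur ≠ [] then [cur] else []) ++ sbAltCur [] ls
    else sbAltCur (cur ++ [l]) ls

-- the accumulated items just get prepended
theorem sbLoop_eq (ls : List String) : ∀ items cur,
    sbLoop items cur ls = items ++ sbAltCur cur ls := by
  induction ls with
  | nil => intro items cur; simp [sbLoop, sbAltCur]; split <;> simp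
  | cons l ls ih =>
    intro items cur
    simp only [sbLoop, sbAltCur]
    split
    · rw [ih]
      split <;> simp
    · rw [ih]

-- blank head is dropped by B
theorem alt_blank_cons (b : String) (hb : sbBlank b = true) (ls : List String) :
    splitblank_alt (b :: ls) = splitblank_alt ls := by
  cases ls with
  | nil => simp [splitblank_alt, sbGroupby, sbSpan, hb]
  | cons x xs =>
    by_cases hx : sbBlank x = true
    · conv_lhs => rw [splitblank_alt, sbGroupby]
      conv_rhs => rw [splitblank_alt, sbGroupby]
      simp [sbSpan, hb, hx]
    · conv_lhs => rw [splitblank_alt, sbGroupby]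
      simp [sbSpan, hb, hx, splitblank_alt]

-- nonblank head starts a group consisting of the maximal nonblank run
theorem alt_nonblank_cons (l : String) (hl : sbBlank l = false) (ls : List String) :
    splitblank_alt (l :: ls) =
      (l :: (sbSpan false ls).1) :: splitblank_alt ((sbSpan false ls).2) := by
  conv_lhs => rw [splitblank_alt, sbGroupby]
  simp [hl, splitblank_alt]

-- joint characterisation of sbAltCur against B
theorem sbAltCur_eq (ls : List String) :
    (sbAltCur [] ls = splitblank_alt ls) ∧
    (∀ cur, cur ≠ [] → sbAltCur cur ls =
      (cur ++ (sbSpan false ls).1) :: splitblank_alt ((sbSpan false ls).2)) := by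
  induction ls with
  | nil =>
    constructor
    · simp [sbAltCur, splitblank_alt, sbGroupby]
    · intro cur hcur; simp [sbAltCur, sbSpan, hcur, splitblank_alt, sbGroupby]
  | cons l ls ih =>
    obtain ⟨ih0, ih1⟩ := ih
    constructor
    · by_cases hl : sbBlank l = true
      · simp [sbAltCur, hl, ih0, alt_blank_cons l hl ls]
      · rw [show sbAltCur [] (l :: ls) = sbAltCur [l] ls by
              simp [sbAltCur, hl]]
        rw [ih1 [l] (by simp), alt_nonblank_cons l (by simpa using hl) ls]
        simp
    · intro cur hcur
      by_cases hl : sbBlank l = true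
      · rw [show sbAltCur cur (l :: ls) = [cur] ++ sbAltCur [] ls by
              simp [sbAltCur, hl, hcur]]
        rw [ih0]
        simp only [sbSpan, hl]
        simp [alt_blank_cons l hl ls]
      · rw [show sbAltCur cur (l :: ls) = sbAltCur (cur ++ [l]) ls by
              simp [sbAltCur, hl]]
        rw [ih1 (cur ++ [l]) (by simp)]
        simp [sbSpan, hl]

-- ===== VERDICT (by name: the statement is the Claim_ definition above) =====
theorem splitblank_spec : Claim_equal_splitblank := by
  intro list _
  unfold Spec_splitblank splitblank
  rw [sbLoop_eq]
  simpa using (sbAltCur_eq list).1
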